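-- pv_equiv track=rewrite | github.com/Montassar-Chihi/ops-tools | emailManager/emailWriter.py | write_email_for_current_3pl
-- ===== SOURCE A (Python) =====
-- def write_email_for_current_3pl(period,current_3pl,all_3pls,funnels_3pls,messages,report_subtitle):
--
--     if period == "daily":
--         subject = all_3pls[current_3pl] + " - Bilan quotidien des performances: " + report_subtitle
--         intro = "<span style='font-family:tahoma;'>Bonjour " + all_3pls[current_3pl] + ",<br><br>J'espère que cet e-mail vous trouvera bien.<br><br>Vous trouverez ci-dessous nos indicateurs de performance clés (KPI) d'hier, ainsi qu'une proposition de plan d'action pour les coursiers répertoriés dans la liste ci-dessous.</span>"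
--         if len(funnels_3pls[current_3pl]) > 0:
--             first = ""
--             second = ""
--             last = ""
--
--             for courier in funnels_3pls[current_3pl]:
--                 if "accéléré" in courier:
--                     last += "<li style='margin-bottom:5px;font-family:tahoma;'>" + courier + "</li>"
--                 elif "Félicitations" in courier:
--                     first += "<li style='margin-bottom:5px;font-family:tahoma;'>" + courier + "</li>"
--                 else:
--                     second += "<li style='margin-bottom:5px;font-family:tahoma;'>" + courier + "</li>"
--
--             body = intro + "<br><br><b style='margin-bottom:5px;font-family:tahoma;'>Actions de AFM hier & Recommandations:</b><ul>" + first + "<br>" + second + "<br>" + last + "</ul>"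
--             body += "<span style='font-family:tahoma;'>  Nous comptons sur votre collaboration et vos compétences managériales pour ramener les performances des coursiers à suivre.<br><br>Cordialement,<br><br>Glovo Ops Team</span>"
--             body += "<br><span style='font-family:tahoma;font-size:11px;color:red'>Veuillez <b>ne pas répondre</b> au rapport quotidien</span>"
--         else:
--             body = intro
--             body += "<span style='font-family:tahoma;'>  Nous comptons sur votre collaboration et vos compétences managériales pour ramener les performances des coursiers à suivre.<br><br>Cordialement,<br><br>Glovo Ops Team</span>"
--             body += "<br><span style='font-family:tahoma;font-size:11px;color:red'>Veuillez <b>ne pas répondre</b> au rapport quotidien</span>"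
--
--     else:
--         subject = all_3pls[current_3pl] + " - Bilan hebdomadaire des performances: "
--         intro = "<span style='font-family:tahoma;'>Bonjour " + all_3pls[current_3pl] + ",<br><br>J'espère que cet e-mail vous trouvera bien.<br><br>Vous trouverez ci-dessous nos indicateurs de performance clés (KPI) de la semaine derniére. Merci de partager avec nous les actions prises cette semaine à propos les coursiers répertoriés dans le rapport ci-dessous ainsi que pour améliorer votre flotte.</span>"
--         body = intro + "<span style='font-family:tahoma;'>  Nous comptons sur votre collaboration et vos compétences managériales pour ramener les performances des coursiers à suivre.<br><br>Cordialement,<br><br>Glovo Ops Team</span>"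
--         body += "<br><span style='font-family:tahoma;font-size:11px;color:blue'>(Merci de <b>répondre</b> par un email contenant les actions pris par vous la semaine derniére)</span>"
--
--     messages[current_3pl] = {"subject": subject, "body": body,
--                              "file": "content/report_" + str(current_3pl) + ".pdf"}
--
--     return messages
-- ===== SOURCE B (Python) =====
-- # B: same subject/intro/body text, but the classifying loop is replaced by three
-- # filtered join passes over the courier list, and the shared tail strings are
-- # hoisted into module constants.  Like A, it mutates `messages` in place.
--
-- _LI = "<li style='margin-bottom:5px;font-family:tahoma;'>"
--
-- _TAIL = "<span style='font-family:tahoma;'>  Nous comptons sur votre collaboration et vos comp\u00e9tences manag\u00e9riales pour ramener les performances des coursiers \u00e0 suivre.<br><br>Cordialement,<br><br>Glovo Ops Team</span>"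
-- _NOREPLY = "<br><span style='font-family:tahoma;font-size:11px;color:red'>Veuillez <b>ne pas r\u00e9pondre</b> au rapport quotidien</span>"
-- _REPLY = "<br><span style='font-family:tahoma;font-size:11px;color:blue'>(Merci de <b>r\u00e9pondre</b> par un email contenant les actions pris par vous la semaine derni\u00e9re)</span>"
--
--
-- def _bucket(couriers, pred):
--     return "".join(_LI + c + "</li>" for c in couriers if pred(c))
--
--
-- def write_email_for_current_3pl(period, current_3pl, all_3pls, funnels_3pls, messages, report_subtitle):
--     name = all_3pls[current_3pl]
--     if period == "daily":
--         subject = name + " - Bilan quotidien des performances: " + report_subtitle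
--         intro = "<span style='font-family:tahoma;'>Bonjour " + name + ",<br><br>J'esp\u00e8re que cet e-mail vous trouvera bien.<br><br>Vous trouverez ci-dessous nos indicateurs de performance cl\u00e9s (KPI) d'hier, ainsi qu'une proposition de plan d'action pour les coursiers r\u00e9pertori\u00e9s dans la liste ci-dessous.</span>"
--         couriers = funnels_3pls[current_3pl]
--         if couriers:
--             last = _bucket(couriers, lambda c: "acc\u00e9l\u00e9r\u00e9" in c)
--             first = _bucket(couriers, lambda c: "F\u00e9licitations" in c and "acc\u00e9l\u00e9r\u00e9" not in c)
--             second = _bucket(couriers, lambda c: "acc\u00e9l\u00e9r\u00e9" not in c and "F\u00e9licitations" not in c)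
--             body = (intro
--                     + "<br><br><b style='margin-bottom:5px;font-family:tahoma;'>Actions de AFM hier & Recommandations:</b><ul>"
--                     + first + "<br>" + second + "<br>" + last + "</ul>"
--                     + _TAIL + _NOREPLY)
--         else:
--             body = intro + _TAIL + _NOREPLY
--     else:
--         subject = name + " - Bilan hebdomadaire des performances: "
--         body = ("<span style='font-family:tahoma;'>Bonjour " + name + ",<br><br>J'esp\u00e8re que cet e-mail vous trouvera bien.<br><br>Vous trouverez ci-dessous nos indicateurs de performance cl\u00e9s (KPI) de la semaine derni\u00e9re. Merci de partager avec nous les actions prises cette semaine \u00e0 propos les coursiers r\u00e9pertori\u00e9s dans le rapport ci-dessous ainsi que pour am\u00e9liorer votre flotte.</span>"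
--                 + _TAIL + _REPLY)
--     messages[current_3pl] = {"subject": subject, "body": body,
--                              "file": "content/report_" + str(current_3pl) + ".pdf"}
--     return messages
-- ===== Notes on version B (the rewrite author's own statement) =====
-- stated objective: idiomatic
-- what changed: The single for-loop that classifies each courier into three string accumulators is replaced by three filtered '' .join passes (one per bucket, with the accéléré-over-Félicitations priority expressed in the filter predicates), and the shared tail strings are hoisted into module constants.
import Mathlib
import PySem

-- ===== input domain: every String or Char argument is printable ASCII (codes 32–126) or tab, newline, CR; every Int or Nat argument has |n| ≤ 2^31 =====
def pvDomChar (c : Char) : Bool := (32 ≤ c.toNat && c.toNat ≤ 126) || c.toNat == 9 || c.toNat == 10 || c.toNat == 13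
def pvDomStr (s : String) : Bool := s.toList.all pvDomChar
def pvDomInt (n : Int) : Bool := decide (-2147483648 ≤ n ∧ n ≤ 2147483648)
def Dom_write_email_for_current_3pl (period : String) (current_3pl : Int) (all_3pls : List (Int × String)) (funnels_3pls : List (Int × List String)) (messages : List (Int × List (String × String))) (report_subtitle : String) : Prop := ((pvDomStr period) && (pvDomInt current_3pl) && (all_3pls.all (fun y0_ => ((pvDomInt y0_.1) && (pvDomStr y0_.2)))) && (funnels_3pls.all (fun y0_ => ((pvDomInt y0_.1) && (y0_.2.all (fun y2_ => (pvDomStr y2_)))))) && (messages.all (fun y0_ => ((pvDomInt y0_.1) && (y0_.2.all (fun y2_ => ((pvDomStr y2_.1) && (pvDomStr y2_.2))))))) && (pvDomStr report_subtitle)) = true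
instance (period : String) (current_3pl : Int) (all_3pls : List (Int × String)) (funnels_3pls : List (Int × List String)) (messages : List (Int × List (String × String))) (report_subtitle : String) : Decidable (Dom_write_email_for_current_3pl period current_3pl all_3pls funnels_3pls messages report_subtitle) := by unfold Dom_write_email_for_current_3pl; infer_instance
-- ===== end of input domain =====

-- B replaces A's single classifying accumulator loop over the courier list with three
-- filtered join passes (one per bucket), hoisting the shared tail strings into constants;
-- same return value. Like A, B performs A's in-place update of `messages` (the returned
-- dict); the theorems are about the return value.

-- ===== PORT A =====
def write_email_for_current_3pl (period : String) (current_3pl : Int) (all_3pls : List (Int × String)) (funnels_3pls : List (Int × List String)) (messages : List (Int × List (String × String))) (report_subtitle : String) : List (Int × List (String × String)) :=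
  let sb :=
    if period = "daily" then
      let subject := (PySem.Dict.mk all_3pls).getD current_3pl "" ++ " - Bilan quotidien des performances: " ++ report_subtitle
      let intro := "<span style='font-family:tahoma;'>Bonjour " ++ (PySem.Dict.mk all_3pls).getD current_3pl "" ++ ",<br><br>J'espère que cet e-mail vous trouvera bien.<br><br>Vous trouverez ci-dessous nos indicateurs de performance clés (KPI) d'hier, ainsi qu'une proposition de plan d'action pour les coursiers répertoriés dans la liste ci-dessous.</span>"
      if PySem.List.len ((PySem.Dict.mk funnels_3pls).getD current_3pl []) > 0 then
        let fsl := ((PySem.Dict.mk funnels_3pls).getD current_3pl []).foldl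
          (fun (acc : String × String × String) courier =>
            if PySem.Str.isIn "accéléré" courier then
              (acc.1, acc.2.1, acc.2.2 ++ ("<li style='margin-bottom:5px;font-family:tahoma;'>" ++ courier ++ "</li>"))
            else if PySem.Str.isIn "Félicitations" courier then
              (acc.1 ++ ("<li style='margin-bottom:5px;font-family:tahoma;'>" ++ courier ++ "</li>"), acc.2.1, acc.2.2)
            else
              (acc.1, acc.2.1 ++ ("<li style='margin-bottom:5px;font-family:tahoma;'>" ++ courier ++ "</li>"), acc.2.2))
          ("", "", "")
        let body := intro ++ "<br><br><b style='margin-bottom:5px;font-family:tahoma;'>Actions de AFM hier & Recommandations:</b><ul>" ++ fsl.1 ++ "<br>" ++ fsl.2.1 ++ "<br>" ++ fsl.2.2 ++ "</ul>"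
        let body := body ++ "<span style='font-family:tahoma;'>  Nous comptons sur votre collaboration et vos compétences managériales pour ramener les performances des coursiers à suivre.<br><br>Cordialement,<br><br>Glovo Ops Team</span>"
        let body := body ++ "<br><span style='font-family:tahoma;font-size:11px;color:red'>Veuillez <b>ne pas répondre</b> au rapport quotidien</span>"
        (subject, body)
      else
        let body := intro
        let body := body ++ "<span style='font-family:tahoma;'>  Nous comptons sur votre collaboration et vos compétences managériales pour ramener les performances des coursiers à suivre.<br><br>Cordialement,<br><br>Glovo Ops Team</span>"
        let body := body ++ "<br><span style='font-family:tahoma;font-size:11px;color:red'>Veuillez <b>ne pas répondre</b> au rapport quotidien</span>"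
        (subject, body)
    else
      let subject := (PySem.Dict.mk all_3pls).getD current_3pl "" ++ " - Bilan hebdomadaire des performances: "
      let intro := "<span style='font-family:tahoma;'>Bonjour " ++ (PySem.Dict.mk all_3pls).getD current_3pl "" ++ ",<br><br>J'espère que cet e-mail vous trouvera bien.<br><br>Vous trouverez ci-dessous nos indicateurs de performance clés (KPI) de la semaine derniére. Merci de partager avec nous les actions prises cette semaine à propos les coursiers répertoriés dans le rapport ci-dessous ainsi que pour améliorer votre flotte.</span>"
      let body := intro ++ "<span style='font-family:tahoma;'>  Nous comptons sur votre collaboration et vos compétences managériales pour ramener les performances des coursiers à suivre.<br><br>Cordialement,<br><br>Glovo Ops Team</span>"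
      let body := body ++ "<br><span style='font-family:tahoma;font-size:11px;color:blue'>(Merci de <b>répondre</b> par un email contenant les actions pris par vous la semaine derniére)</span>"
      (subject, body)
  (PySem.Dict.insert (PySem.Dict.mk messages) current_3pl
    [("subject", sb.1), ("body", sb.2),
     ("file", "content/report_" ++ PySem.Int.toStr current_3pl ++ ".pdf")]).items

-- ===== PORT B =====
def pvLi (c : String) : String := "<li style='margin-bottom:5px;font-family:tahoma;'>" ++ c ++ "</li>"

def pvBucket (couriers : List String) (pred : String → Bool) : String :=
  PySem.Str.join "" ((couriers.filter pred).map pvLi)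

def pvTail : String := "<span style='font-family:tahoma;'>  Nous comptons sur votre collaboration et vos compétences managériales pour ramener les performances des coursiers à suivre.<br><br>Cordialement,<br><br>Glovo Ops Team</span>"
def pvNoReply : String := "<br><span style='font-family:tahoma;font-size:11px;color:red'>Veuillez <b>ne pas répondre</b> au rapport quotidien</span>"
def pvReply : String := "<br><span style='font-family:tahoma;font-size:11px;color:blue'>(Merci de <b>répondre</b> par un email contenant les actions pris par vous la semaine derniére)</span>"

def write_email_for_current_3pl_alt (period : String) (current_3pl : Int) (all_3pls : List (Int × String)) (funnels_3pls : List (Int × List String)) (messages : List (Int × List (String × String))) (report_subtitle : String) : List (Int × List (String × String)) :=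
  let name := (PySem.Dict.mk all_3pls).getD current_3pl ""
  let sb :=
    if period = "daily" then
      let subject := name ++ " - Bilan quotidien des performances: " ++ report_subtitle
      let intro := "<span style='font-family:tahoma;'>Bonjour " ++ name ++ ",<br><br>J'espère que cet e-mail vous trouvera bien.<br><br>Vous trouverez ci-dessous nos indicateurs de performance clés (KPI) d'hier, ainsi qu'une proposition de plan d'action pour les coursiers répertoriés dans la liste ci-dessous.</span>"
      let couriers := (PySem.Dict.mk funnels_3pls).getD current_3pl []
      if couriers ≠ [] then
        let last := pvBucket couriers (fun c => PySem.Str.isIn "accéléré" c)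
        let first := pvBucket couriers (fun c => PySem.Str.isIn "Félicitations" c && !PySem.Str.isIn "accéléré" c)
        let second := pvBucket couriers (fun c => !PySem.Str.isIn "accéléré" c && !PySem.Str.isIn "Félicitations" c)
        (subject, intro ++ "<br><br><b style='margin-bottom:5px;font-family:tahoma;'>Actions de AFM hier & Recommandations:</b><ul>" ++ first ++ "<br>" ++ second ++ "<br>" ++ last ++ "</ul>" ++ pvTail ++ pvNoReply)
      else
        (subject, intro ++ pvTail ++ pvNoReply)
    else
      (name ++ " - Bilan hebdomadaire des performances: ",
       "<span style='font-family:tahoma;'>Bonjour " ++ name ++ ",<br><br>J'espère que cet e-mail vous trouvera bien.<br><br>Vous trouverez ci-dessous nos indicateurs de performance clés (KPI) de la semaine derniére. Merci de partager avec nous les actions prises cette semaine à propos les coursiers répertoriés dans le rapport ci-dessous ainsi que pour améliorer votre flotte.</span>" ++ pvTail ++ pvReply)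
  (PySem.Dict.insert (PySem.Dict.mk messages) current_3pl
    [("subject", sb.1), ("body", sb.2),
     ("file", "content/report_" ++ PySem.Int.toStr current_3pl ++ ".pdf")]).items

-- ===== PRECONDITION & SPEC =====
-- Pre_: Python A raises KeyError unless current_3pl is a key of all_3pls and, on the
-- "daily" period, also a key of funnels_3pls.
def Pre_write_email_for_current_3pl (period : String) (current_3pl : Int) (all_3pls : List (Int × String)) (funnels_3pls : List (Int × List String)) (messages : List (Int × List (String × String))) (report_subtitle : String) : Prop :=
  (PySem.Dict.mk all_3pls).contains current_3pl = true ∧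
  (period = "daily" → (PySem.Dict.mk funnels_3pls).contains current_3pl = true)
instance (period : String) (current_3pl : Int) (all_3pls : List (Int × String)) (funnels_3pls : List (Int × List String)) (messages : List (Int × List (String × String))) (report_subtitle : String) : Decidable (Pre_write_email_for_current_3pl period current_3pl all_3pls funnels_3pls messages report_subtitle) := by unfold Pre_write_email_for_current_3pl; infer_instance

def pvWitness_write_email_for_current_3pl : String × Int × (List (Int × String)) × (List (Int × List String)) × (List (Int × List (String × String))) × String :=
  ("daily", 0, [(0, "Ops")], [(0, ["courier ok"])], [], "KPI")

def Spec_write_email_for_current_3pl (period : String) (current_3pl : Int) (all_3pls : List (Int × String)) (funnels_3pls : List (Int × List String)) (messages : List (Int × List (String × String))) (report_subtitle : String) (out : List (Int × List (String × String))) : Prop := out = write_email_for_current_3pl_alt period current_3pl all_3pls funnels_3pls messages report_subtitle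
instance (period : String) (current_3pl : Int) (all_3pls : List (Int × String)) (funnels_3pls : List (Int × List String)) (messages : List (Int × List (String × String))) (report_subtitle : String) (out : List (Int × List (String × String))) : Decidable (Spec_write_email_for_current_3pl period current_3pl all_3pls funnels_3pls messages report_subtitle out) := by unfold Spec_write_email_for_current_3pl; infer_instance

-- ===== CLAIM (what is proved, stated in full; the proofs are below) =====
def Claim_equal_write_email_for_current_3pl : Prop := ∀ (period : String) (current_3pl : Int) (all_3pls : List (Int × String)) (funnels_3pls : List (Int × List String)) (messages : List (Int × List (String × String))) (report_subtitle : String), Dom_write_email_for_current_3pl period current_3pl all_3pls funnels_3pls messages report_subtitle → Pre_write_email_for_current_3pl period current_3pl all_3pls funnels_3pls messages report_subtitle → Spec_write_email_for_current_3pl period current_3pl all_3pls funnels_3pls messages report_subtitle (write_email_for_current_3pl period current_3pl all_3pls funnels_3pls messages report_subtitle)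

-- ===== LEMMAS AND PROOFS =====

theorem pv_witness_ok :
    Dom_write_email_for_current_3pl (pvWitness_write_email_for_current_3pl.1) (pvWitness_write_email_for_current_3pl.2.1) (pvWitness_write_email_for_current_3pl.2.2.1) (pvWitness_write_email_for_current_3pl.2.2.2.1) (pvWitness_write_email_for_current_3pl.2.2.2.2.1) (pvWitness_write_email_for_current_3pl.2.2.2.2.2) ∧
    Pre_write_email_for_current_3pl (pvWitness_write_email_for_current_3pl.1) (pvWitness_write_email_for_current_3pl.2.1) (pvWitness_write_email_for_current_3pl.2.2.1) (pvWitness_write_email_for_current_3pl.2.2.2.1) (pvWitness_write_email_for_current_3pl.2.2.2.2.1) (pvWitness_write_email_for_current_3pl.2.2.2.2.2) := by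
  decide

theorem chars_join_empty_cons (a : List Char) (rest : List (List Char)) :
    PySem.Chars.join [] (a :: rest) = a ++ PySem.Chars.join [] rest := by
  cases rest with
  | nil => simp [PySem.Chars.join_singleton, PySem.Chars.join_nil]
  | cons b t => simp [PySem.Chars.join_cons_cons]

theorem str_join_empty_cons (x : String) (xs : List String) :
    PySem.Str.join "" (x :: xs) = x ++ PySem.Str.join "" xs := by
  simp [PySem.Str.join, chars_join_empty_cons]

theorem str_join_empty_nil : PySem.Str.join "" ([] : List String) = "" := by
  simp [PySem.Str.join, PySem.Chars.join_nil]

theorem pvBucket_nil (p : String → Bool) : pvBucket [] p = "" := by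
  simp [pvBucket, str_join_empty_nil]

theorem pvBucket_cons (c : String) (cs : List String) (p : String → Bool) :
    pvBucket (c :: cs) p = if p c then pvLi c ++ pvBucket cs p else pvBucket cs p := by
  by_cases h : p c = true <;>
    simp [pvBucket, h, str_join_empty_cons]

theorem pv_loop_eq (cs : List String) (f s l : String) :
    cs.foldl
      (fun (acc : String × String × String) courier =>
        if PySem.Str.isIn "accéléré" courier then
          (acc.1, acc.2.1, acc.2.2 ++ ("<li style='margin-bottom:5px;font-family:tahoma;'>" ++ courier ++ "</li>"))
        else if PySem.Str.isIn "Félicitations" courier then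
          (acc.1 ++ ("<li style='margin-bottom:5px;font-family:tahoma;'>" ++ courier ++ "</li>"), acc.2.1, acc.2.2)
        else
          (acc.1, acc.2.1 ++ ("<li style='margin-bottom:5px;font-family:tahoma;'>" ++ courier ++ "</li>"), acc.2.2))
      (f, s, l)
    = (f ++ pvBucket cs (fun c => PySem.Str.isIn "Félicitations" c && !PySem.Str.isIn "accéléré" c),
       s ++ pvBucket cs (fun c => !PySem.Str.isIn "accéléré" c && !PySem.Str.isIn "Félicitations" c),
       l ++ pvBucket cs (fun c => PySem.Str.isIn "accéléré" c)) := by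
  induction cs generalizing f s l with
  | nil => simp [pvBucket_nil]
  | cons c cs ih =>
    rw [List.foldl_cons]
    cases hA : PySem.Str.isIn "accéléré" c with
    | true =>
      rw [if_pos rfl, ih]
      simp [pvBucket_cons, hA, pvLi, String.append_assoc, -PySem.Str.isIn_eq]
    | false =>
      rw [if_neg (by simp)]
      cases hF : PySem.Str.isIn "Félicitations" c with
      | true =>
        rw [if_pos rfl, ih]
        simp [pvBucket_cons, hA, hF, pvLi, String.append_assoc, -PySem.Str.isIn_eq]
      | false =>
        rw [if_neg (by simp), ih]
        simp [pvBucket_cons, hA, hF, pvLi, String.append_assoc, -PySem.Str.isIn_eq]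

-- ===== VERDICT (by name: the statement is the Claim_ definition above) =====
theorem write_email_for_current_3pl_spec : Claim_equal_write_email_for_current_3pl := by
  intro period current_3pl all_3pls funnels_3pls messages report_subtitle _hDom _hPre
  unfold Spec_write_email_for_current_3pl
  unfold write_email_for_current_3pl write_email_for_current_3pl_alt
  by_cases hp : period = "daily"
  · simp only [hp]
    generalize (PySem.Dict.mk funnels_3pls).getD current_3pl [] = cs
    cases cs with
    | nil => simp [PySem.List.len, pvTail, pvNoReply]
    | cons c t =>
      have hlen : PySem.List.len (c :: t) > 0 := by
        simp only [PySem.List.len_eq, List.length_cons]; omega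
      rw [if_pos hlen, if_pos (List.cons_ne_nil c t), pv_loop_eq]
      simp [pvTail, pvNoReply, String.append_assoc]
  · simp [hp, pvTail, pvReply]
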